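-- pv_equiv track=rewrite | github.com/jakubtuchol/epi | src/honors_class.py | create_line
-- ===== SOURCE A (Python) =====
-- def create_line(line, length):
--     """
--     Create properly spaced line
--     """
--
--     full_line = []
--     cur_len = sum([len(elt) for elt in line])
--     remaining = length - cur_len
--     expected_spaces = remaining // (len(line) - 1)
--     overflow_spaces = remaining % (len(line) - 1)
--
--     for elt in line[:-1]:
--         overflow = ' ' if overflow_spaces else ''
--         spaces = '{}{}'.format(' ' * expected_spaces, overflow)
--         full_line.append(elt)
--         full_line.append(spaces)
--
--         if overflow_spaces:
--             overflow_spaces -= 1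
--
--     full_line.append(line[-1])
--
--     return ''.join(full_line)
-- ===== SOURCE B (Python) =====
-- def create_line(line, length):
--     """
--     Create properly spaced line
--     """
--     remaining = length - sum(map(len, line))
--     q, r = divmod(remaining, len(line) - 1)
--     slim = ' ' * q
--     wide = slim + ' '
--     tail = slim.join(line[r:])
--     if r == 0:
--         return tail
--     return wide.join(line[:r]) + wide + tail
-- ===== Notes on version B (the rewrite author's own statement) =====
-- stated objective: faster
-- what changed: Instead of A's per-word loop that appends each word and a newly formatted gap string while decrementing an overflow counter, B has no per-gap loop at all: it splits the words at index r and assembles the line with two str.join calls (the first r gaps use the one-space-wider separator, the rest the base separator).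
import Mathlib
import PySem

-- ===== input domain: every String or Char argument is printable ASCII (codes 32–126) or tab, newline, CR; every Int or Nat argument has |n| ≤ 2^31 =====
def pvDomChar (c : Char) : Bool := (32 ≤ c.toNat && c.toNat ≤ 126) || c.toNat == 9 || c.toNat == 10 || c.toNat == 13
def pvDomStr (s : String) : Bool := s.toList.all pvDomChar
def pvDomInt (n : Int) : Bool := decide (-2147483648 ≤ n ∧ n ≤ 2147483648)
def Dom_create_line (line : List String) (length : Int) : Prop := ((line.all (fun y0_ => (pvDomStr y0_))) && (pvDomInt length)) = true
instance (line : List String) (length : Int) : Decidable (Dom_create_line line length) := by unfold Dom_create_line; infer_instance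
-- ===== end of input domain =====

-- B drops A's per-gap loop (append word+gap, decrement overflow counter) and instead splits the
-- words at index r, assembling the line with two str.join calls on a wide and a slim separator
-- (objective: faster by a constant factor, measured; no per-gap string formatting).

-- ===== PORT A =====
def create_line (line : List String) (length : Int) : String :=
  let cur_len : Int := (line.map (fun elt => (PySem.Str.len elt : Int))).sum
  let remaining := length - cur_len
  let expected_spaces := PySem.Int.floordiv remaining ((line.length : Int) - 1)
  let overflow_spaces := PySem.Int.mod remaining ((line.length : Int) - 1)
  let st := (PySem.List.slice line none (some (-1))).foldl
      (fun (st : List String × Int) elt =>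
        let overflow : String := if st.2 ≠ 0 then " " else ""
        let spaces := String.ofList (List.replicate expected_spaces.toNat ' ') ++ overflow
        (st.1 ++ [elt, spaces], if st.2 ≠ 0 then st.2 - 1 else st.2))
      ([], overflow_spaces)
  -- line[-1]: none = IndexError, excluded by Pre_create_line
  let full_line := st.1 ++ [(PySem.List.pyGet? line (-1)).getD ""]
  PySem.Str.join "" full_line

-- ===== PORT B =====
def create_line_alt (line : List String) (length : Int) : String :=
  let remaining := length - (line.map (fun w => (PySem.Str.len w : Int))).sum
  let q := PySem.Int.floordiv remaining ((line.length : Int) - 1)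
  let r := PySem.Int.mod remaining ((line.length : Int) - 1)
  let slim := String.ofList (List.replicate q.toNat ' ')
  let wide := slim ++ " "
  let tail := PySem.Str.join slim (PySem.List.slice line (some r) none)
  if r = 0 then tail
  else PySem.Str.join wide (PySem.List.slice line none (some r)) ++ wide ++ tail

-- ===== PRECONDITION & SPEC =====
-- Pre_ excludes exactly the inputs on which A raises: fewer than two words gives
-- ZeroDivisionError (len(line)-1 == 0) or IndexError (line[-1] on []).
def Pre_create_line (line : List String) (_length : Int) : Prop := 2 ≤ line.length
instance (line : List String) (length : Int) : Decidable (Pre_create_line line length) := by unfold Pre_create_line; infer_instance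
def pvWitness_create_line : List String × Int := (["ab", "c", "d"], 10)

def Spec_create_line (line : List String) (length : Int) (out : String) : Prop := out = create_line_alt line length
instance (line : List String) (length : Int) (out : String) : Decidable (Spec_create_line line length out) := by unfold Spec_create_line; infer_instance

-- ===== CLAIM (what is proved, stated in full; the proofs are below) =====
def Claim_equal_create_line : Prop := ∀ (line : List String) (length : Int), Dom_create_line line length → Pre_create_line line length → Spec_create_line line length (create_line line length)

-- ===== LEMMAS AND PROOFS =====
def pvPairs (gap : String) : List String → Nat → List String
  | [], _ => []
  | w :: ws, n => w :: (gap ++ (if n ≠ 0 then " " else "")) :: pvPairs gap ws (n - 1)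

theorem pvA_loop (gap : String) (ws : List String) :
    ∀ (ov : Int) (acc : List String), 0 ≤ ov →
    (ws.foldl
        (fun (st : List String × Int) elt =>
          (st.1 ++ [elt, gap ++ (if st.2 ≠ 0 then " " else "")],
           if st.2 ≠ 0 then st.2 - 1 else st.2))
        (acc, ov)).1
      = acc ++ pvPairs gap ws ov.toNat := by
  induction ws with
  | nil => intro ov acc _; simp [pvPairs]
  | cons w ws ih =>
    intro ov acc hov
    have hov' : 0 ≤ (if ov ≠ 0 then ov - 1 else ov) := by split <;> omega
    simp only [List.foldl_cons]
    rw [ih _ _ hov']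
    have h1 : (if ov ≠ 0 then ov - 1 else ov).toNat = ov.toNat - 1 := by split <;> omega
    have h2 : (ov ≠ 0) = (ov.toNat ≠ 0) := by
      apply propext; constructor <;> intro h <;> omega
    rw [h1]
    simp only [pvPairs, h2, List.append_assoc, List.cons_append, List.nil_append]

theorem pv_join_empty_cons (x : String) (xs : List String) :
    PySem.Str.join "" (x :: xs) = x ++ PySem.Str.join "" xs := by
  cases xs with
  | nil =>
    apply String.toList_injective
    simp [PySem.Str.toList_join, PySem.Chars.join, List.intercalate]
  | cons y ys =>
    apply String.toList_injective
    simp [PySem.Str.toList_join, PySem.Chars.join_cons_cons]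

theorem pv_join_singleton (sep x : String) :
    PySem.Str.join sep [x] = x := by
  apply String.toList_injective
  simp [PySem.Str.toList_join, PySem.Chars.join, List.intercalate]

theorem pv_join_cons (sep x : String) (xs : List String) (h : xs ≠ []) :
    PySem.Str.join sep (x :: xs) = x ++ sep ++ PySem.Str.join sep xs := by
  cases xs with
  | nil => exact absurd rfl h
  | cons y ys =>
    apply String.toList_injective
    simp [PySem.Str.toList_join, PySem.Chars.join_cons_cons]

-- A's interleaved word/gap list joined on "" equals B's two-join split at n.
theorem pv_main (slim t : String) (ws : List String) :
    ∀ n : Nat, n ≤ ws.length →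
    PySem.Str.join "" (pvPairs slim ws n ++ [t]) =
      (if n = 0 then PySem.Str.join slim (ws ++ [t])
       else PySem.Str.join (slim ++ " ") ((ws ++ [t]).take n) ++ (slim ++ " ")
            ++ PySem.Str.join slim ((ws ++ [t]).drop n)) := by
  induction ws with
  | nil =>
    intro n hn
    have : n = 0 := by simpa using hn
    subst this
    simp [pvPairs, pv_join_singleton]
  | cons w ws ih =>
    intro n hn
    cases n with
    | zero =>
      simp only [pvPairs, if_true, List.cons_append]
      rw [pv_join_empty_cons, pv_join_empty_cons]
      have := ih 0 (by omega)
      rw [if_pos rfl] at this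
      rw [this, pv_join_cons slim w (ws ++ [t]) (by simp)]
      simp [String.append_assoc]
    | succ m =>
      simp only [pvPairs, List.cons_append, Nat.succ_ne_zero, if_false,
        Nat.add_sub_cancel, List.take_succ_cons, List.drop_succ_cons]
      rw [pv_join_empty_cons, pv_join_empty_cons]
      have hm : m ≤ ws.length := by simpa using Nat.lt_succ_iff.mp (Nat.lt_of_lt_of_le (Nat.lt_succ_self m) (by simpa using hn))
      rw [ih m hm]
      by_cases h0 : m = 0
      · subst h0
        simp [pv_join_singleton, String.append_assoc]
      · rw [if_neg h0, pv_join_cons (slim ++ " ") w ((ws ++ [t]).take m)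
            (by
              have : 0 < ((ws ++ [t]).take m).length := by
                simp [List.length_take]
                omega
              intro hc; rw [hc] at this; simp at this)]
        simp [String.append_assoc]

theorem pv_last_split (line : List String) (h : 2 ≤ line.length) :
    line.dropLast ++ [(PySem.List.pyGet? line (-1)).getD ""] = line := by
  rw [PySem.List.pyGet?_neg_one]
  cases hl : line.getLast? with
  | none => simp [List.getLast?_eq_none_iff] at hl; subst hl; simp at h
  | some x =>
    simp only [Option.getD_some]
    exact List.dropLast_append_getLast? x hl

-- ===== VERDICT (by name: the statement is the Claim_ definition above) =====

theorem create_line_spec : Claim_equal_create_line := by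
  intro line length _ hpre
  unfold Spec_create_line create_line create_line_alt
  dsimp only
  have hpos : (0 : Int) < (line.length : Int) - 1 := by
    have : 2 ≤ line.length := hpre
    omega
  set rem := length - (line.map (fun elt => (PySem.Str.len elt : Int))).sum with hrem
  set q := PySem.Int.floordiv rem ((line.length : Int) - 1) with hq
  set r := PySem.Int.mod rem ((line.length : Int) - 1) with hr
  have hov : 0 ≤ r := PySem.Int.mod_nonneg rem hpos
  have hlt : r < (line.length : Int) - 1 := PySem.Int.mod_lt rem hpos
  rw [PySem.List.slice_to_neg_one]
  rw [pvA_loop _ _ _ _ hov]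
  simp only [List.nil_append]
  rw [pv_main _ _ _ r.toNat (by simp [List.length_dropLast]; omega)]
  rw [pv_last_split line hpre]
  rw [PySem.List.slice_from _ hov, PySem.List.slice_to _ hov]
  by_cases h0 : r = 0
  · rw [if_pos h0, if_pos (by omega : r.toNat = 0)]
    simp [h0]
  · rw [if_neg h0, if_neg (by omega : ¬ r.toNat = 0)]
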